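-- pv_equiv track=rewrite | github.com/Junaem/Algorithm_SSAFY | SWEA/0829/6190_정곤이의단조증가하는수/s1.py | makeX
-- ===== SOURCE A (Python) =====
-- def check(num):
--     st_n = str(num)
--     for i in range(1, len(st_n)):
--         if st_n[i] < st_n[i-1]:
--             return False
--     return True
--
-- def makeX(N, li):
--     rtn = 0
--     for i in range(N-1):
--         for j in range(i+1, N):
--             x = li[i] * li[j]
--             if check(x):
--                 if x > rtn:
--                     rtn = x
--     if rtn:
--         return rtn
--     else:
--         return -1
-- ===== SOURCE B (Python) =====
-- def check(num):
--     s = str(num)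
--     return s == ''.join(sorted(s))
--
-- def makeX(N, li):
--     xs = li[:max(N, 0)]
--     products = sorted((a * b for i, a in enumerate(xs) for b in xs[i + 1:]),
--                       reverse=True)
--     for p in products:
--         if p <= 0:
--             break
--         if check(p):
--             return p
--     return -1
-- ===== Notes on version B (the rewrite author's own statement) =====
-- stated objective: alternative
-- what changed: Instead of A's nested index loops keeping a running maximum of valid products, B sorts all pair products descending once and returns the first one that passes the digit test (early exit when products become non-positive), and the digit test itself is a sort-and-compare instead of an adjacent-digit scan.
import Mathlib
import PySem

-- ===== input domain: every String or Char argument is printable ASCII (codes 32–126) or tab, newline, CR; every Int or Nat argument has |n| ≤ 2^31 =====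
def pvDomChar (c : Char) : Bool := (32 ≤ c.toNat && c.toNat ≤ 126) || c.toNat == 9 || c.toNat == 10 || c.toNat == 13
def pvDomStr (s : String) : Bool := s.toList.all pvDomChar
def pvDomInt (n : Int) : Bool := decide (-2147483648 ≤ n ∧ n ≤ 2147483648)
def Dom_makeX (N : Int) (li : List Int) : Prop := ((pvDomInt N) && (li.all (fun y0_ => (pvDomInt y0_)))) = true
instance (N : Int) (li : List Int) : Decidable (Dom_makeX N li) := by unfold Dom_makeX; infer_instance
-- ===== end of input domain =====

-- B replaces A's nested loops with a running maximum by: sort all pair products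
-- descending once, return the first that passes the (sort-and-compare) digit test,
-- breaking early once products are non-positive.

-- ===== PORT A =====
-- check(num): scan adjacent digit pairs of str(num), False on the first descent
def checkA_go : Char → List Char → Bool
  | _, [] => true
  | prev, c :: rest => if c < prev then false else checkA_go c rest

def checkA (num : Int) : Bool :=
  match PySem.Int.toChars num with
  | [] => true
  | c :: rest => checkA_go c rest

def makeX (N : Int) (li : List Int) : Int :=
  let rtn : Int := (PySem.List.pyRange 0 (N - 1)).foldl (fun rtn i =>
    (PySem.List.pyRange (i + 1) N).foldl (fun rtn j =>
      let x := PySem.List.pyGetD li i 0 * PySem.List.pyGetD li j 0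
      if checkA x = true then (if x > rtn then x else rtn) else rtn) rtn) 0
  if rtn ≠ 0 then rtn else -1

-- ===== PORT B =====
-- check(num): str(num) equals its sorted characters
def checkB (num : Int) : Bool :=
  let s := PySem.Int.toChars num
  s == PySem.List.sorted s (fun c => c)

-- the for-loop over the descending product list: break at p ≤ 0, return at first valid p
def scanB : List Int → Int
  | [] => -1
  | p :: rest => if p ≤ 0 then -1 else if checkB p then p else scanB rest

def makeX_alt (N : Int) (li : List Int) : Int :=
  let xs := PySem.List.slice li none (some (max N 0))
  let products := PySem.List.sorted
    ((PySem.List.enumerate xs).flatMap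
      (fun ka => (PySem.List.slice xs (some (ka.1 + 1)) none).map (fun b => ka.2 * b)))
    (fun p => p) true
  scanB products

-- ===== PRECONDITION & SPEC =====
-- Pre_ excludes exactly the inputs where A raises IndexError: N ≥ 2 with fewer than N elements.
def Pre_makeX (N : Int) (li : List Int) : Prop := N ≤ (li.length : Int) ∨ N ≤ 1
instance (N : Int) (li : List Int) : Decidable (Pre_makeX N li) := by unfold Pre_makeX; infer_instance
def pvWitness_makeX : Int × List Int := (3, [12, 3, 8])

def Spec_makeX (N : Int) (li : List Int) (out : Int) : Prop := out = makeX_alt N li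
instance (N : Int) (li : List Int) (out : Int) : Decidable (Spec_makeX N li out) := by unfold Spec_makeX; infer_instance

-- ===== CLAIM (what is proved, stated in full; the proofs are below) =====
def Claim_equal_makeX : Prop := ∀ (N : Int) (li : List Int), Dom_makeX N li → Pre_makeX N li → Spec_makeX N li (makeX N li)

-- ===== LEMMAS AND PROOFS =====

-- the digit test: scan-based (A) and sort-based (B) agree
theorem checkA_go_iff (rest : List Char) (c : Char) :
    checkA_go c rest = true ↔ List.IsChain (· ≤ ·) (c :: rest) := by
  induction rest generalizing c with
  | nil => simp [checkA_go]
  | cons c' rest ih =>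
    simp only [checkA_go, List.isChain_cons_cons, ← ih c']
    split_ifs with h
    · simp [not_le.mpr h]
    · simp [not_lt.mp h]

theorem check_eq : checkA = checkB := by
  funext num
  unfold checkA checkB
  cases h : PySem.Int.toChars num with
  | nil => simp [PySem.List.sorted]
  | cons c rest =>
    rw [Bool.eq_iff_iff, checkA_go_iff, beq_iff_eq]
    constructor
    · intro hc
      exact (PySem.List.sorted_eq_self_of_pairwise _ _ (by simpa using hc.pairwise)).symm
    · intro he
      have hp := PySem.List.sorted_pairwise (c :: rest) (fun x => x)
      rw [← he] at hp
      simpa using hp.isChain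

-- the predicate B's scan effectively searches for
def validB (p : Int) : Bool := decide (0 < p) && checkB p

-- the list of pair products, peeled off the front
def pairProds : List Int → List Int
  | [] => []
  | a :: rest => rest.map (fun b => a * b) ++ pairProds rest

theorem pairProds_short (xs : List Int) (h : xs.length ≤ 1) : pairProds xs = [] := by
  match xs, h with
  | [], _ => rfl
  | [a], _ => rfl

-- B's comprehension builds exactly pairProds
theorem B_products (xs : List Int) : ∀ (pre : List Int),
    (PySem.List.enumerate xs (pre.length : Int)).flatMap
      (fun ka => (PySem.List.slice (pre ++ xs) (some (ka.1 + 1)) none).map (fun b => ka.2 * b))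
    = pairProds xs := by
  induction xs with
  | nil => intro pre; simp [PySem.List.enumerate, pairProds]
  | cons a rest ih =>
    intro pre
    rw [PySem.List.enumerate_cons, List.flatMap_cons]
    have h1 : ((pre.length : Int) + 1) = (((pre ++ [a]).length : Nat) : Int) := by simp
    have h2 : pre ++ a :: rest = (pre ++ [a]) ++ rest := by simp
    rw [h1, h2, PySem.List.slice_from _ (by positivity), Int.toNat_natCast, List.drop_left]
    rw [ih (pre ++ [a])]
    rfl

theorem B_products0 (xs : List Int) :
    (PySem.List.enumerate xs).flatMap
      (fun ka => (PySem.List.slice xs (some (ka.1 + 1)) none).map (fun b => ka.2 * b))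
    = pairProds xs := by
  simpa using B_products xs []

-- A's nested index loops fold exactly over pairProds
theorem A_fold (upd : Int → Int → Int) :
    ∀ (xs : List Int) (r : Int),
    (List.range xs.length).foldl (fun r k =>
        (xs.drop (k + 1)).foldl (fun r b => upd r (xs.getD k 0 * b)) r) r
    = (pairProds xs).foldl upd r := by
  intro xs
  induction xs with
  | nil => intro r; rfl
  | cons a rest ih =>
    intro r
    rw [List.length_cons, List.range_succ_eq_map, List.foldl_cons, List.foldl_map]
    simp only [List.drop_succ_cons, List.getD_cons_succ, List.getD_cons_zero, List.drop_zero]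
    rw [ih, show pairProds (a :: rest) = rest.map (fun b => a * b) ++ pairProds rest from rfl,
      List.foldl_append, List.foldl_map]

theorem pyGetD_take (li : List Int) (n : Nat) (i : Int) (h0 : 0 ≤ i) (h1 : i < (n : Int)) :
    PySem.List.pyGetD li i 0 = PySem.List.pyGetD (li.take n) i 0 := by
  obtain ⟨k, rfl⟩ := Int.eq_ofNat_of_zero_le h0
  rw [PySem.List.pyGetD_natCast, PySem.List.pyGetD_natCast]
  have hk : k < n := by exact_mod_cast h1
  simp [List.getD, List.getElem?_take_of_lt hk]

-- A's nested loops over 2 ≤ N ≤ len li reduce to a fold over pairProds of the N-prefix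
theorem A_main (N : Int) (li : List Int) (_h2 : 2 ≤ N) (hlen : N ≤ (li.length : Int)) :
    (PySem.List.pyRange 0 (N - 1)).foldl (fun rtn i =>
      (PySem.List.pyRange (i + 1) N).foldl (fun rtn j =>
        if checkB (PySem.List.pyGetD li i 0 * PySem.List.pyGetD li j 0) = true
        then (if PySem.List.pyGetD li i 0 * PySem.List.pyGetD li j 0 > rtn
              then PySem.List.pyGetD li i 0 * PySem.List.pyGetD li j 0 else rtn)
        else rtn) rtn) 0
    = (pairProds (li.take N.toNat)).foldl
        (fun r x => if checkB x = true then (if x > r then x else r) else r) 0 := by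
  set upd : Int → Int → Int := fun r x => if checkB x = true then (if x > r then x else r) else r
  set xs : List Int := li.take N.toNat with hxs
  have hxl : xs.length = N.toNat := by
    rw [hxs, List.length_take]; omega
  have hNlen : N = PySem.List.len xs := by simp [PySem.List.len_eq, hxl]; omega
  -- step 1: replace li by xs, collapse the inner index loop
  have step1 : ∀ (r : Int), ∀ i ∈ PySem.List.pyRange 0 (N - 1),
      (PySem.List.pyRange (i + 1) N).foldl (fun rtn j =>
        upd rtn (PySem.List.pyGetD li i 0 * PySem.List.pyGetD li j 0)) r
      = (xs.drop (i + 1).toNat).foldl (fun rtn b =>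
          upd rtn (PySem.List.pyGetD xs i 0 * b)) r := by
    intro r i hi
    rw [PySem.List.mem_pyRange_one] at hi
    rw [PySem.List.foldl_congr_mem _ _
      (fun rtn j => upd rtn (PySem.List.pyGetD xs i 0 * PySem.List.pyGetD xs j 0)) r ?_]
    · rw [hNlen]
      exact PySem.List.foldl_pyRange_pyGetD xs 0
        (fun acc v => upd acc (PySem.List.pyGetD xs i 0 * v)) r (a := i + 1) (by omega)
    · intro acc j hj
      rw [PySem.List.mem_pyRange_one] at hj
      show upd acc (PySem.List.pyGetD li i 0 * PySem.List.pyGetD li j 0)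
        = upd acc (PySem.List.pyGetD xs i 0 * PySem.List.pyGetD xs j 0)
      rw [← pyGetD_take li N.toNat i hi.1 (by omega),
          ← pyGetD_take li N.toNat j (by omega) (by omega)]
  rw [PySem.List.foldl_congr_mem _ _ _ 0 step1]
  -- step 2: extend the outer range by the no-op last index N-1
  have hx : (PySem.List.pyRange 0 N).foldl (fun r i =>
      (xs.drop (i + 1).toNat).foldl (fun rtn b => upd rtn (PySem.List.pyGetD xs i 0 * b)) r) 0
      = (PySem.List.pyRange 0 (N - 1)).foldl (fun r i =>
      (xs.drop (i + 1).toNat).foldl (fun rtn b => upd rtn (PySem.List.pyGetD xs i 0 * b)) r) 0 := by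
    have hsplit : PySem.List.pyRange 0 N = PySem.List.pyRange 0 (N - 1) ++ [N - 1] := by
      conv_lhs => rw [show N = (N - 1) + 1 by ring]
      exact PySem.List.pyRange_one_succ_right (by omega)
    rw [hsplit, List.foldl_append]
    simp only [List.foldl_cons, List.foldl_nil]
    rw [show (N - 1 + 1).toNat = xs.length by omega, List.drop_length]
    rfl
  rw [← hx]
  -- step 3: reindex by Nat and apply A_fold
  rw [PySem.List.pyRange_zero, List.foldl_map]
  rw [PySem.List.foldl_congr_mem _ _
    (fun r k => (xs.drop (k + 1)).foldl (fun rtn b => upd rtn (xs.getD k 0 * b)) r) 0 ?_]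
  · rw [show N.toNat = xs.length by omega]
    exact A_fold upd xs 0
  · intro acc k _
    show (xs.drop ((k : Int) + 1).toNat).foldl
        (fun rtn b => upd rtn (PySem.List.pyGetD xs (k : Int) 0 * b)) acc
      = (xs.drop (k + 1)).foldl (fun rtn b => upd rtn (xs.getD k 0 * b)) acc
    rw [show ((k : Int) + 1).toNat = k + 1 by omega, PySem.List.pyGetD_natCast]

-- the accumulator update is `max`
theorem step_eq_max (r x : Int) : (if x > r then x else r) = max r x := by
  simp only [max_def]; split_ifs <;> omega

-- B's scan on a descending list is first-match search for validB
theorem scanB_sorted (qs : List Int) (h : qs.Pairwise (fun a b => b ≤ a)) :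
    scanB qs = (qs.find? validB).getD (-1) := by
  induction qs with
  | nil => rfl
  | cons p rest ih =>
    rw [List.pairwise_cons] at h
    rw [scanB, List.find?_cons]
    by_cases hp : p ≤ 0
    · have hv : validB p = false := by simp [validB]; omega
      rw [if_pos hp, hv]
      have : rest.find? validB = none := by
        rw [List.find?_eq_none]
        intro x hx
        have := h.1 x hx
        simp [validB]; omega
      simp [this]
    · rw [if_neg hp]
      by_cases hc : checkB p
      · have hv : validB p = true := by simp [validB, hc]; omega
        simp [hc, hv]
      · have hv : validB p = false := by simp [validB, hc]
        simp [hc, hv, ih h.2]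

-- first match = head of the filtered list
theorem find?_eq_head_filter (q : Int → Bool) (l : List Int) :
    l.find? q = (l.filter q).head? := by
  induction l with
  | nil => rfl
  | cons x t ih =>
    rw [List.find?_cons, List.filter_cons]
    by_cases hx : q x = true
    · simp only [hx, if_true]
      rfl
    · rw [Bool.not_eq_true] at hx
      simp only [hx, Bool.false_eq_true, if_false]
      exact ih

-- running max with seed bounds
theorem foldl_max_le (l : List Int) : ∀ (a h : Int), a ≤ h → (∀ x ∈ l, x ≤ h) →
    l.foldl max a ≤ h := by
  induction l with
  | nil => intro a h ha _; simpa using ha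
  | cons x t ih =>
    intro a h ha hub
    rw [List.foldl_cons]
    exact ih _ h (max_le ha (hub x (by simp))) (fun y hy => hub y (by simp [hy]))

theorem le_foldl_max_seed (l : List Int) : ∀ (a : Int), a ≤ l.foldl max a := by
  induction l with
  | nil => intro a; simp
  | cons x t ih =>
    intro a
    rw [List.foldl_cons]
    exact le_trans (le_max_left a x) (ih _)

theorem mem_le_foldl_max (l : List Int) : ∀ (a x : Int), x ∈ l → x ≤ l.foldl max a := by
  induction l with
  | nil => intro a x hx; simp at hx
  | cons y t ih =>
    intro a x hx
    rw [List.foldl_cons]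
    rcases List.mem_cons.mp hx with rfl | hx
    · exact le_trans (le_max_right a x) (le_foldl_max_seed t _)
    · exact ih _ x hx

theorem foldl_max_eq (G : List Int) (h : Int) (hmem : h ∈ G) (hub : ∀ x ∈ G, x ≤ h)
    (h0 : 0 ≤ h) : G.foldl max 0 = h :=
  le_antisymm (foldl_max_le G 0 h h0 hub) (mem_le_foldl_max G 0 h hmem)

-- non-positive elements are invisible to a 0-seeded running max
theorem foldl_max_filter_pos (F : List Int) : ∀ (a : Int), 0 ≤ a →
    F.foldl max a = (F.filter (fun x => decide (0 < x))).foldl max a := by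
  induction F with
  | nil => intro a _; rfl
  | cons x t ih =>
    intro a ha
    rw [List.foldl_cons, List.filter_cons]
    by_cases hx : 0 < x
    · simp only [hx, decide_true, if_true, List.foldl_cons]
      exact ih _ (le_trans ha (le_max_left a x))
    · simp only [hx, decide_false]
      rw [show max a x = a by omega]
      exact ih _ ha

-- A's 0-seeded running maximum and B's descending scan give the same final answer
theorem finish (ps : List Int) :
    (if ps.foldl (fun r x => if checkB x = true then (if x > r then x else r) else r) 0 ≠ 0
       then ps.foldl (fun r x => if checkB x = true then (if x > r then x else r) else r) 0
       else -1)
    = scanB (PySem.List.sorted ps (fun p => p) true) := by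
  have hfold : ps.foldl (fun r x => if checkB x = true then (if x > r then x else r) else r) 0
      = (ps.filter checkB).foldl max 0 := by
    rw [← List.foldl_filter]
    congr 1
    funext r x
    simp [step_eq_max]
  set sq := PySem.List.sorted ps (fun p => p) true with hsq
  have hpw : sq.Pairwise (fun a b => b ≤ a) := by
    simpa using PySem.List.sorted_pairwise_rev ps (fun p => p)
  rw [scanB_sorted sq hpw, find?_eq_head_filter, hfold]
  have hG : (sq.filter validB).Perm (ps.filter validB) :=
    (PySem.List.sorted_perm ps (fun p => p) true).filter validB
  have hsplit : ps.filter validB = (ps.filter checkB).filter (fun x => decide (0 < x)) := by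
    rw [List.filter_filter]
    rfl
  rw [foldl_max_filter_pos (ps.filter checkB) 0 le_rfl, ← hsplit]
  cases hh : (sq.filter validB).head? with
  | none =>
    have : sq.filter validB = [] := by
      cases hl : sq.filter validB with
      | nil => rfl
      | cons a t => rw [hl] at hh; simp at hh
    rw [this] at hG
    rw [(List.Perm.nil_eq hG).symm]
    simp
  | some h =>
    obtain ⟨t, ht⟩ : ∃ t, sq.filter validB = h :: t := by
      cases hl : sq.filter validB with
      | nil => rw [hl] at hh; simp at hh
      | cons a t => rw [hl] at hh; simp at hh; exact ⟨t, by rw [hh]⟩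
    have hmemsq : h ∈ sq.filter validB := by rw [ht]; simp
    have hvalid : validB h = true := (List.mem_filter.mp hmemsq).2
    have hpos : 0 < h := by simp [validB] at hvalid; exact hvalid.1
    have hmem : h ∈ ps.filter validB := hG.mem_iff.mp hmemsq
    have hub : ∀ x ∈ ps.filter validB, x ≤ h := by
      intro x hx
      have hxsq : x ∈ sq.filter validB := hG.mem_iff.mpr hx
      rw [ht] at hxsq
      rcases List.mem_cons.mp hxsq with rfl | hxt
      · exact le_rfl
      · have hpw' : (sq.filter validB).Pairwise (fun a b => b ≤ a) := hpw.filter validB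
        rw [ht, List.pairwise_cons] at hpw'
        exact hpw'.1 x hxt
    rw [foldl_max_eq (ps.filter validB) h hmem hub (le_of_lt hpos),
      Option.getD_some, if_pos (by omega : h ≠ 0)]

-- ===== VERDICT (by name: the statement is the Claim_ definition above) =====
theorem makeX_spec : Claim_equal_makeX := by
  intro N li _ hpre
  unfold Spec_makeX makeX makeX_alt Pre_makeX at *
  dsimp only
  rw [check_eq]
  by_cases hN : N ≤ 1
  · -- degenerate count: no pair is formed on either side
    rw [PySem.List.pyRange_one_eq_nil (by omega), List.foldl_nil,
      PySem.List.slice_to li (le_max_right N 0), B_products0,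
      pairProds_short _ (by rw [List.length_take]; omega)]
    simp [PySem.List.sorted, scanB]
  · -- main case: 2 ≤ N ≤ len li
    have hlen : N ≤ (li.length : Int) := by omega
    rw [PySem.List.slice_to li (le_max_right N 0), show max N 0 = N by omega, B_products0,
      A_main N li (by omega) hlen]
    exact finish _
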